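-- pv_equiv track=rewrite | github.com/gap-system/tree-sitter-gap | etc/extract_g.py | is_function_file
-- ===== SOURCE A (Python) =====
-- def is_function_file(lines: list[str]) -> bool:
--     """Check if lines correspond to a file read by `ReadAsFunction`.
--
--     To do so, check that first non-comment line starts with `local` or that the
--     last non-comment line starts with a `return` statement.
--
--     Note
--     ----
--     This is a rather hacky method, and it will fail in some cases.
--     """
--     for line in lines:
--         if len(line.strip()) != 0 and line[0] != "#":
--             if line.lower().startswith("local"):
--                 return True
--             break
--     for line in reversed(lines):
--         if len(line.strip()) != 0 and line[0] != "#":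
--             if line.strip().lower().startswith("return"):
--                 return True
--             break
--     return False
-- ===== SOURCE B (Python) =====
-- def is_function_file(lines: list[str]) -> bool:
--     """Check if lines correspond to a file read by `ReadAsFunction`."""
--     sig = [l for l in lines if l.strip() and l[0] != "#"]
--     if not sig:
--         return False
--     return sig[0].lower().startswith("local") or sig[-1].strip().lower().startswith("return")
-- ===== Notes on version B (the rewrite author's own statement) =====
-- stated objective: simpler
-- what changed: Replaced the forward loop and the reversed loop by one filter of the significant (non-blank, non-comment) lines, then a single boolean over its first and last elements.
import Mathlib
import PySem

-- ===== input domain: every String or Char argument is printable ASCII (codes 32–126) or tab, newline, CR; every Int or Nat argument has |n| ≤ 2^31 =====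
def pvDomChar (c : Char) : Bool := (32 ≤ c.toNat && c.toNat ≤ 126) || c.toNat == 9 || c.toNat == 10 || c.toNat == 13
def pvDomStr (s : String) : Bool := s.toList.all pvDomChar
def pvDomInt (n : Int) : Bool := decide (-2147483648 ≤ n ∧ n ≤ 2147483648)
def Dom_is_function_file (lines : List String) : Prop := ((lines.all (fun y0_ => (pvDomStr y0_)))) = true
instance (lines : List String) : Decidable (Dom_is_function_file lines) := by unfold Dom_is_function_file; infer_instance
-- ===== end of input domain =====

-- B replaces A's forward loop plus reversed loop by one filter of the significant
-- lines followed by a boolean over its first and last elements (objective: simpler).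

-- ===== PORT A =====
-- significance test shared verbatim by both of A's loops: len(line.strip()) != 0 and line[0] != "#"
def pvSig (l : String) : Bool :=
  (PySem.Str.len (PySem.Str.strip l) != 0) && (PySem.Str.pyGet? l 0 != some '#')

-- A's first loop: returns true iff it executed `return True`
def pvLoop1 : List String → Bool
  | [] => false
  | l :: rest =>
    if pvSig l then
      (if PySem.Str.startswith (PySem.Str.lower l) "local" then true else false)
    else pvLoop1 rest

-- A's second loop (run on `reversed(lines)`)
def pvLoop2 : List String → Bool
  | [] => false
  | l :: rest =>
    if pvSig l then
      (if PySem.Str.startswith (PySem.Str.lower (PySem.Str.strip l)) "return" then true else false)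
    else pvLoop2 rest

def is_function_file (lines : List String) : Bool :=
  if pvLoop1 lines then true
  else if pvLoop2 lines.reverse then true
  else false

-- ===== PORT B =====
def is_function_file_alt (lines : List String) : Bool :=
  let sig := lines.filter (fun l =>
    (PySem.Str.len (PySem.Str.strip l) != 0) && (PySem.Str.pyGet? l 0 != some '#'))
  match sig with
  | [] => false
  | h :: t =>
    PySem.Str.startswith (PySem.Str.lower h) "local" ||
    PySem.Str.startswith (PySem.Str.lower (PySem.Str.strip ((h :: t).getLast (by simp)))) "return"

-- ===== PRECONDITION & SPEC =====
def Spec_is_function_file (lines : List String) (out : Bool) : Prop := out = is_function_file_alt lines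
instance (lines : List String) (out : Bool) : Decidable (Spec_is_function_file lines out) := by unfold Spec_is_function_file; infer_instance

-- ===== CLAIM (what is proved, stated in full; the proofs are below) =====
def Claim_equal_is_function_file : Prop := ∀ (lines : List String), Dom_is_function_file lines → Spec_is_function_file lines (is_function_file lines)

-- ===== LEMMAS AND PROOFS =====
theorem pvLoop1_eq_filter (lines : List String) :
    pvLoop1 lines =
      match lines.filter pvSig with
      | [] => false
      | h :: _ => PySem.Str.startswith (PySem.Str.lower h) "local" := by
  induction lines with
  | nil => simp [pvLoop1]
  | cons l rest ih =>
    by_cases h : pvSig l = true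
    · simp [pvLoop1, h]
    · simp [pvLoop1, h, ih]

theorem pvLoop2_eq_filter (lines : List String) :
    pvLoop2 lines =
      match lines.filter pvSig with
      | [] => false
      | h :: _ => PySem.Str.startswith (PySem.Str.lower (PySem.Str.strip h)) "return" := by
  induction lines with
  | nil => simp [pvLoop2]
  | cons l rest ih =>
    by_cases h : pvSig l = true
    · simp [pvLoop2, h]
    · simp [pvLoop2, h, ih]

-- ===== VERDICT (by name: the statement is the Claim_ definition above) =====
theorem is_function_file_spec : Claim_equal_is_function_file := by
  intro lines _
  unfold Spec_is_function_file is_function_file is_function_file_alt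
  rw [pvLoop1_eq_filter, pvLoop2_eq_filter, List.filter_reverse]
  unfold pvSig
  cases hf : lines.filter (fun l =>
      (PySem.Str.len (PySem.Str.strip l) != 0) && (PySem.Str.pyGet? l 0 != some '#')) with
  | nil => simp
  | cons h t =>
    rcases ht : (h :: t).reverse with _ | ⟨r, rs⟩
    · simp at ht
    · have hr : r = (h :: t).getLast (by simp) := by
        have := List.getLast?_eq_head?_reverse (xs := h :: t)
        rw [ht] at this
        simp [List.getLast?_eq_getLast_of_ne_nil (by simp : (h :: t) ≠ [])] at this
        exact this.symm
      simp only [hr]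
      cases PySem.Str.startswith (PySem.Str.lower h) "local" <;>
        cases PySem.Str.startswith
          (PySem.Str.lower (PySem.Str.strip ((h :: t).getLast (by simp)))) "return" <;>
        simp
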